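-- pv_equiv track=rewrite | github.com/MarkSon-42/Team_ALGO | minwoo/_Level_02_Normal/_0811_두 큐 합 같게 만들기(ref).py | solution
-- ===== SOURCE A (Python) =====
-- from collections import deque
--
-- def solution(queue1, queue2):
--     queue1, queue2 = deque(queue1), deque(queue2)
--     queue1_sum, queue2_sum = sum(queue1), sum(queue2)
--
--     for i in range(len(queue1) * 3):  # 왜 len q1의 3배만큼 도는지 근거를 모르겠음..
--         if queue1_sum == queue2_sum:
--             return i
--         if queue1_sum < queue2_sum:
--             popped = queue2.popleft()
--             queue1_sum += popped
--             queue2_sum -= popped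
--             queue1.append(popped)
--         else:
--             popped = queue1.popleft()
--             queue1_sum -= popped
--             queue2_sum += popped
--             queue2.append(popped)
--     return -1
-- ===== SOURCE B (Python) =====
-- def solution(queue1, queue2):
--     combined = list(queue1) + list(queue2)
--     M = len(combined)
--     total = sum(combined)
--     s = sum(queue1)
--     l, r = 0, len(queue1)
--     for i in range(len(queue1) * 3):
--         if 2 * s == total:
--             return i
--         if 2 * s < total:
--             s += combined[r % M]
--             r += 1
--         else:
--             s -= combined[l % M]
--             l += 1
--     return -1
-- ===== Notes on version B (the rewrite author's own statement) =====
-- stated objective: alternative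
-- what changed: Replaces the two live deques with their two running sums by a sliding window of two index pointers (l, r) over the static concatenated list with a single window sum compared as 2*s vs total.
-- outside the precondition, e.g. on solution([-1], [-1]): A returns 0, B returns 0; on solution([1, -1], [-2]): A returns 1, B returns 1
import Mathlib
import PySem

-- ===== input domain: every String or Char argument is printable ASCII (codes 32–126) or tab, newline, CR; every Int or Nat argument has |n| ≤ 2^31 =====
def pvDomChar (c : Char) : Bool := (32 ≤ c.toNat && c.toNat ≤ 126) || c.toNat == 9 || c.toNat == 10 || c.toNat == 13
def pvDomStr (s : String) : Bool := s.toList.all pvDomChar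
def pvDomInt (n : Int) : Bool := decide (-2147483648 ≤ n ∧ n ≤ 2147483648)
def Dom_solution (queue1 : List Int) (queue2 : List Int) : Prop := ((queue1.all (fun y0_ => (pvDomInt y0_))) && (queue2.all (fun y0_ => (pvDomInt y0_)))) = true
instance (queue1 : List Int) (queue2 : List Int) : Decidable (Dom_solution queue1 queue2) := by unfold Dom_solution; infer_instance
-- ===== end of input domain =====

-- B replaces A's two live deques and two running sums by a sliding window of two
-- index pointers over the static concatenated list with a single window sum (alternative; not measured faster).

-- ===== PORT A =====
-- A's for-loop with early return, as fuel recursion over the remaining iterations.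
-- The `[] => 0` branches are A's IndexError (popleft from an empty deque): unreachable under Pre_solution.
def loopA : List Int → List Int → Int → Int → Nat → Nat → Int
  | _, _, _, _, _, 0 => -1
  | q1, q2, s1, s2, i, fuel + 1 =>
    if s1 = s2 then (i : Int)
    else if s1 < s2 then
      match q2 with
      | [] => 0
      | p :: rest => loopA (q1 ++ [p]) rest (s1 + p) (s2 - p) (i + 1) fuel
    else
      match q1 with
      | [] => 0
      | p :: rest => loopA rest (q2 ++ [p]) (s1 - p) (s2 + p) (i + 1) fuel

def solution (queue1 : List Int) (queue2 : List Int) : Int :=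
  loopA queue1 queue2 queue1.sum queue2.sum 0 (queue1.length * 3)

-- ===== PORT B =====
-- Source B's loop: combined[r % M] is always in range when the branch runs (M > 0 then), so getD is exact.
def loopB : List Int → Nat → Int → Int → Nat → Nat → Nat → Nat → Int
  | _, _, _, _, _, _, _, 0 => -1
  | combined, M, total, s, l, r, i, fuel + 1 =>
    if 2 * s = total then (i : Int)
    else if 2 * s < total then
      loopB combined M total (s + combined.getD (r % M) 0) l (r + 1) (i + 1) fuel
    else
      loopB combined M total (s - combined.getD (l % M) 0) (l + 1) r (i + 1) fuel

def solution_alt (queue1 : List Int) (queue2 : List Int) : Int :=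
  let combined := queue1 ++ queue2
  loopB combined combined.length combined.sum queue1.sum 0 queue1.length 0 (queue1.length * 3)

-- ===== PRECONDITION & SPEC =====
-- Pre_ excludes inputs whose total sum is negative: exactly there A can pop from an empty
-- deque (IndexError); the raising set inside it is trajectory-dependent, not closed-form, and on
-- the negative-total inputs where A still returns, B returns the same value (see cites).
def Pre_solution (queue1 : List Int) (queue2 : List Int) : Prop :=
  0 ≤ queue1.sum + queue2.sum
instance (queue1 : List Int) (queue2 : List Int) : Decidable (Pre_solution queue1 queue2) := by
  unfold Pre_solution; infer_instance

def pvWitness_solution : List Int × List Int := ([3, 2, 7, 2], [4, 6, 5, 1])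

def Spec_solution (queue1 : List Int) (queue2 : List Int) (out : Int) : Prop :=
  out = solution_alt queue1 queue2
instance (queue1 : List Int) (queue2 : List Int) (out : Int) : Decidable (Spec_solution queue1 queue2 out) := by
  unfold Spec_solution; infer_instance

-- ===== CLAIM (what is proved, stated in full; the proofs are below) =====
def Claim_equal_solution : Prop := ∀ (queue1 : List Int) (queue2 : List Int), Dom_solution queue1 queue2 → Pre_solution queue1 queue2 → Spec_solution queue1 queue2 (solution queue1 queue2)

-- ===== LEMMAS AND PROOFS =====

-- circular window of length k starting at l over `c` (length M)
def circ (c : List Int) (M l k : Nat) : List Int :=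
  (List.range k).map (fun j => c.getD ((l + j) % M) 0)

theorem circ_zero (c : List Int) (M l : Nat) : circ c M l 0 = [] := rfl

theorem circ_snoc (c : List Int) (M l k : Nat) :
    circ c M l (k + 1) = circ c M l k ++ [c.getD ((l + k) % M) 0] := by
  simp [circ, List.range_succ]

theorem circ_cons (c : List Int) (M l k : Nat) :
    circ c M l (k + 1) = c.getD (l % M) 0 :: circ c M (l + 1) k := by
  simp only [circ, List.range_succ_eq_map, List.map_cons, List.map_map, Function.comp_def]
  refine congrArg₂ _ (by norm_num) ?_
  apply List.map_congr_left
  intro j _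
  congr 2
  omega

theorem circ_length (c : List Int) (M l k : Nat) : (circ c M l k).length = k := by
  simp [circ]

-- the main simulation invariant, by induction on fuel
theorem loop_eq (c : List Int) (fuel : Nat) :
    ∀ (l w i : Nat) (q1 q2 : List Int) (s1 s2 : Int),
    q1 = circ c c.length l w → q2 = circ c c.length (l + w) (c.length - w) →
    s1 = q1.sum → s2 = q2.sum → w ≤ c.length → 0 ≤ c.sum → s1 + s2 = c.sum →
    loopA q1 q2 s1 s2 i fuel = loopB c c.length c.sum s1 l (l + w) i fuel := by
  induction fuel with
  | zero => intros; rfl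
  | succ fuel ih =>
    intro l w i q1 q2 s1 s2 hq1 hq2 hs1 hs2 hwM htot hsum
    rw [loopA.eq_def, loopB.eq_def]
    simp only []
    by_cases heq : s1 = s2
    · rw [if_pos heq, if_pos (by omega : 2 * s1 = c.sum)]
    · rw [if_neg heq, if_neg (by omega : ¬ 2 * s1 = c.sum)]
      by_cases hlt : s1 < s2
      · -- extend: A pops q2; q2 is nonempty because w < M (else s2 = 0 and s1 = c.sum ≥ 0)
        have hwlt : w < c.length := by
          rcases Nat.lt_or_ge w c.length with h | h
          · exact h
          · exfalso
            have hw : w = c.length := le_antisymm hwM h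
            have : s2 = 0 := by rw [hs2, hq2, hw, Nat.sub_self, circ_zero]; rfl
            omega
        rw [if_pos hlt, if_pos (by omega : 2 * s1 < c.sum)]
        have hsplit : q2 = c.getD ((l + w) % c.length) 0
            :: circ c c.length (l + w + 1) (c.length - (w + 1)) := by
          have h := circ_cons c c.length (l + w) (c.length - (w + 1))
          rw [show (c.length - (w + 1)) + 1 = c.length - w by omega] at h
          rw [hq2, h]
        rw [hsplit]
        simp only []
        have hstep := ih l (w + 1) (i + 1) (q1 ++ [c.getD ((l + w) % c.length) 0])
          (circ c c.length (l + w + 1) (c.length - (w + 1)))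
          (s1 + c.getD ((l + w) % c.length) 0)
          (s2 - c.getD ((l + w) % c.length) 0)
          (by rw [hq1, ← circ_snoc])
          (by rw [show l + (w + 1) = l + w + 1 by omega])
          (by simp [hs1])
          (by rw [hsplit, List.sum_cons] at hs2; omega)
          (by omega) htot (by omega)
        rw [show l + (w + 1) = l + w + 1 by omega] at hstep
        exact hstep
      · -- shrink: A pops q1; q1 is nonempty because 0 < w (else s1 = 0 and s2 = c.sum, with s1 > s2)
        have hw0 : 0 < w := by
          rcases Nat.eq_zero_or_pos w with h | h
          · exfalso
            have : s1 = 0 := by rw [hs1, hq1, h, circ_zero]; rfl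
            omega
          · exact h
        rw [if_neg hlt, if_neg (by omega : ¬ 2 * s1 < c.sum)]
        have hsplit : q1 = c.getD (l % c.length) 0 :: circ c c.length (l + 1) (w - 1) := by
          have h := circ_cons c c.length l (w - 1)
          rw [show (w - 1) + 1 = w by omega] at h
          rw [hq1, h]
        rw [hsplit]
        simp only []
        have happ : q2 ++ [c.getD (l % c.length) 0]
            = circ c c.length ((l + 1) + (w - 1)) (c.length - (w - 1)) := by
          rw [hq2, show (l + 1) + (w - 1) = l + w by omega,
            show c.length - (w - 1) = (c.length - w) + 1 by omega, circ_snoc,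
            show l + w + (c.length - w) = l + c.length by omega, Nat.add_mod_right]
        have hstep := ih (l + 1) (w - 1) (i + 1) (circ c c.length (l + 1) (w - 1))
          (q2 ++ [c.getD (l % c.length) 0])
          (s1 - c.getD (l % c.length) 0)
          (s2 + c.getD (l % c.length) 0)
          rfl happ
          (by rw [hsplit, List.sum_cons] at hs1; omega)
          (by simp [hs2])
          (by omega) htot (by omega)
        rw [show (l + 1) + (w - 1) = l + w by omega] at hstep
        exact hstep

theorem circ_init_left (queue1 queue2 : List Int) :
    circ (queue1 ++ queue2) (queue1 ++ queue2).length 0 queue1.length = queue1 := by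
  apply List.ext_getElem
  · simp [circ_length]
  · intro j h1 h2
    simp only [circ, List.getElem_map, List.getElem_range]
    have hj : j < queue1.length := by simpa [circ_length] using h2
    have hjM : (0 + j) % (queue1 ++ queue2).length = j := by
      rw [Nat.zero_add, Nat.mod_eq_of_lt]
      simp only [List.length_append]
      omega
    rw [hjM]
    rw [List.getD_eq_getElem?_getD, List.getElem?_append_left hj]
    simp [hj]

theorem circ_init_right (queue1 queue2 : List Int) :
    circ (queue1 ++ queue2) (queue1 ++ queue2).length (0 + queue1.length)
      ((queue1 ++ queue2).length - queue1.length) = queue2 := by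
  apply List.ext_getElem
  · simp [circ_length]
  · intro j h1 h2
    simp only [circ, List.getElem_map, List.getElem_range]
    have hj : j < queue2.length := by
      simpa [circ_length] using h2
    have hjM : (0 + queue1.length + j) % (queue1 ++ queue2).length = queue1.length + j := by
      rw [Nat.zero_add, Nat.mod_eq_of_lt]
      simp only [List.length_append]
      omega
    rw [hjM]
    rw [List.getD_eq_getElem?_getD, List.getElem?_append_right (by omega)]
    simp [hj]

-- ===== VERDICT (by name: the statement is the Claim_ definition above) =====
theorem solution_spec : Claim_equal_solution := by
  intro queue1 queue2 _ hpre
  unfold Spec_solution solution solution_alt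
  have htot : 0 ≤ (queue1 ++ queue2).sum := by
    simpa [Pre_solution] using hpre
  have h := loop_eq (queue1 ++ queue2) (queue1.length * 3) 0 queue1.length 0
    queue1 queue2 queue1.sum queue2.sum
    (circ_init_left queue1 queue2).symm (circ_init_right queue1 queue2).symm
    rfl rfl (by simp) htot (by simp)
  simpa using h
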